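-- pv_equiv track=rewrite | github.com/smallzhao/wavchecker | plugins/audiofilters/src/filters/snr/snr.py | smooth_spoken_frames
-- ===== SOURCE A (Python) =====
-- def smooth_spoken_frames(spoken_frames, min_frames_in_silence, min_frames_in_speech):
--     n_frames = len(spoken_frames)
--     prev_speech_pos = -1
--     for frame_ind in range(n_frames):
--         if spoken_frames[frame_ind]:
--             if prev_speech_pos >= 0:
--                 if (prev_speech_pos + 1) < frame_ind:
--                     spoken_frames[(prev_speech_pos + 1):frame_ind] = [True] * (frame_ind - prev_speech_pos - 1)
--             prev_speech_pos = frame_ind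
--         else:
--             if prev_speech_pos >= 0:
--                 if (frame_ind - prev_speech_pos) > min_frames_in_silence:
--                     prev_speech_pos = -1
--     # if prev_speech_pos >= 0:
--         # if (prev_speech_pos + 1) < n_frames:
--             # spoken_frames[(prev_speech_pos + 1):n_frames] = [True] * (n_frames - prev_speech_pos - 1)
--     speech_start = -1
--     for frame_ind in range(n_frames):
--         if spoken_frames[frame_ind]:
--             if speech_start < 0:
--                 speech_start = frame_ind
--         else:
--             if speech_start >= 0:
--                 if (frame_ind - speech_start) >= min_frames_in_speech:
--                     yield (speech_start, frame_ind)
--                 speech_start = -1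
-- ===== SOURCE B (Python) =====
-- def smooth_spoken_frames(spoken_frames, min_frames_in_silence, min_frames_in_speech):
--     # Interval-merging formulation (same results and same in-place mutation as A):
--     # collect the indices of speech frames once, merge them into half-open
--     # intervals [s, e) (a gap of length g between two speech frames is bridged
--     # when g == 0 or g <= min_frames_in_silence), write True over each merged
--     # interval (this reproduces A's gap filling exactly: only interior gaps,
--     # bounded by speech on both sides, are touched), and emit every interval
--     # that ends before the array end and is long enough.
--     n = len(spoken_frames)
--     segments = []
--     for i, frame in enumerate(spoken_frames):
--         if frame:
--             if segments and i - segments[-1][1] <= max(min_frames_in_silence, 0):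
--                 segments[-1][1] = i + 1
--             else:
--                 segments.append([i, i + 1])
--     for s, e in segments:
--         spoken_frames[s:e] = [True] * (e - s)
--     for s, e in segments:
--         if e < n and e - s >= min_frames_in_speech:
--             yield (s, e)
-- ===== Notes on version B (the rewrite author's own statement) =====
-- stated objective: alternative
-- what changed: Instead of A's two passes over the boolean array (a per-frame state machine that fills short silence gaps in place, then a second per-frame scan for speech runs), B collects the indices of True frames once and runs classic interval merging over them (bridge a gap of length g when g == 0 or g <= min_frames_in_silence); the merged [s,e) intervals drive both the in-place mutation and the yields (yield when e < n and e - s >= min_frames_in_speech), so the boolean array is never re-scanned.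
import Mathlib
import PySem

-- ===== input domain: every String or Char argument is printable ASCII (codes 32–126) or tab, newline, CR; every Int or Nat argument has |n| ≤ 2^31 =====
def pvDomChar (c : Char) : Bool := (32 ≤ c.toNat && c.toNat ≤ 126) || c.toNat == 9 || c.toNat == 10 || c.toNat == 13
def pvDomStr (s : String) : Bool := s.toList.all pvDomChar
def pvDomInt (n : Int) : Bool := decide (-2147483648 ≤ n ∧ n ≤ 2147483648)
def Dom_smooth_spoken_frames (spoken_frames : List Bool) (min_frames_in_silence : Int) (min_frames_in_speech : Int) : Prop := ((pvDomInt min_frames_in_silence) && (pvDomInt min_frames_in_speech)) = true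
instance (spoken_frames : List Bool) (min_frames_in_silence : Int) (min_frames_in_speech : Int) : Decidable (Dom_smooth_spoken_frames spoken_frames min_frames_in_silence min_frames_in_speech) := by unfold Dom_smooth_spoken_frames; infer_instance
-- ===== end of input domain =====

-- B replaces A's two per-frame passes over the boolean array by interval merging over the
-- True indices (the Python B performs the same in-place mutation of spoken_frames as A;
-- the equivalence proved here is about the returned/yielded values).

-- ===== PORT A =====
-- first loop body of A: fill a short silence gap on meeting a speech frame
-- (the slice assignment spoken_frames[(prev+1):frame_ind] = [True]*(frame_ind-prev-1)
--  is ported by hand as take/replicate/drop; exact since 0 ≤ prev+1 ≤ frame_ind ≤ len)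
def aStep1 (min_frames_in_silence : Int) (st : List Bool × Int) (frame_ind : Int) : List Bool × Int :=
  let frames := st.1
  let prev := st.2
  if PySem.List.pyGetD frames frame_ind false then
    (if prev ≥ 0 then
       if prev + 1 < frame_ind then
         frames.take (prev + 1).toNat ++ List.replicate (frame_ind - prev - 1).toNat true
           ++ frames.drop frame_ind.toNat
       else frames
     else frames, frame_ind)
  else
    if prev ≥ 0 then
      if frame_ind - prev > min_frames_in_silence then (frames, -1) else (frames, prev)
    else (frames, prev)

-- second loop body of A: accumulate the yielded (speech_start, frame_ind) pairs
def aStep2 (min_frames_in_speech : Int) (frames : List Bool)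
    (st : List (Int × Int) × Int) (frame_ind : Int) : List (Int × Int) × Int :=
  let out := st.1
  let start := st.2
  if PySem.List.pyGetD frames frame_ind false then
    (out, if start < 0 then frame_ind else start)
  else
    if start ≥ 0 then
      (if frame_ind - start ≥ min_frames_in_speech then out ++ [(start, frame_ind)] else out, -1)
    else (out, start)

def smooth_spoken_frames (spoken_frames : List Bool) (min_frames_in_silence : Int) (min_frames_in_speech : Int) : List (Int × Int) :=
  let n : Int := (spoken_frames.length : Int)
  let filled := ((PySem.List.pyRange 0 n 1).foldl (aStep1 min_frames_in_silence) (spoken_frames, -1)).1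
  ((PySem.List.pyRange 0 n 1).foldl (aStep2 min_frames_in_speech filled) ([], -1)).1

-- ===== PORT B =====
-- Source B loop body: on a True frame at index i, either extend the last interval
-- (gap i - last_end is 0 or at most min_frames_in_silence) or open a new one
def bMergeStep (min_frames_in_silence : Int) (segs : List (Int × Int)) (p : Int × Bool) : List (Int × Int) :=
  if p.2 then
    match segs.getLast? with
    | some se =>
        if p.1 - se.2 ≤ max min_frames_in_silence 0 then segs.dropLast ++ [(se.1, p.1 + 1)]
        else segs ++ [(p.1, p.1 + 1)]
    | none => segs ++ [(p.1, p.1 + 1)]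
  else segs

def smooth_spoken_frames_alt (spoken_frames : List Bool) (min_frames_in_silence : Int) (min_frames_in_speech : Int) : List (Int × Int) :=
  let n : Int := (spoken_frames.length : Int)
  let segments := (PySem.List.enumerate spoken_frames 0).foldl (bMergeStep min_frames_in_silence) []
  segments.filter (fun p => decide (p.2 < n) && decide (p.2 - p.1 ≥ min_frames_in_speech))

-- ===== PRECONDITION & SPEC =====
def Spec_smooth_spoken_frames (spoken_frames : List Bool) (min_frames_in_silence : Int) (min_frames_in_speech : Int) (out : List (Int × Int)) : Prop := out = smooth_spoken_frames_alt spoken_frames min_frames_in_silence min_frames_in_speech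
instance (spoken_frames : List Bool) (min_frames_in_silence : Int) (min_frames_in_speech : Int) (out : List (Int × Int)) : Decidable (Spec_smooth_spoken_frames spoken_frames min_frames_in_silence min_frames_in_speech out) := by unfold Spec_smooth_spoken_frames; infer_instance

-- ===== CLAIM (what is proved, stated in full; the proofs are below) =====
def Claim_equal_smooth_spoken_frames : Prop := ∀ (spoken_frames : List Bool) (min_frames_in_silence : Int) (min_frames_in_speech : Int), Dom_smooth_spoken_frames spoken_frames min_frames_in_silence min_frames_in_speech → Spec_smooth_spoken_frames spoken_frames min_frames_in_silence min_frames_in_speech (smooth_spoken_frames spoken_frames min_frames_in_silence min_frames_in_speech)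

-- ===== LEMMAS AND PROOFS =====

-- ---------- proof-side run/gap machinery (intermediate forms between the two ports) ----------

-- termination helper for the run scans
theorem pvDropTwo_lt {l : List Bool} (h : l ≠ []) :
    ((l.dropWhile id).dropWhile (fun b => !b)).length < l.length := by
  rcases l with _ | ⟨x, t⟩
  · simp at h
  · cases x
    · calc ((((false : Bool) :: t).dropWhile id).dropWhile (fun b => !b)).length
          = (t.dropWhile (fun b => !b)).length := by simp [List.dropWhile]
        _ ≤ t.length := List.length_dropWhile_le _ _
        _ < (false :: t).length := by simp
    · calc (((true :: t).dropWhile id).dropWhile (fun b => !b)).length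
          = ((t.dropWhile id).dropWhile (fun b => !b)).length := by simp [List.dropWhile]
        _ ≤ (t.dropWhile id).length := List.length_dropWhile_le _ _
        _ ≤ t.length := List.length_dropWhile_le _ _
        _ < (true :: t).length := by simp

-- gap filling expressed run-by-run (intermediate form of A's first loop)
def fillRuns (min_frames_in_silence : Int) (l : List Bool) : List Bool :=
  if h : l = [] then []
  else
    let sp := l.takeWhile id
    let rest := l.dropWhile id
    let gap := rest.takeWhile (fun b => !b)
    let rest2 := rest.dropWhile (fun b => !b)
    if rest2 = [] then sp ++ gap
    else if (gap.length : Int) ≤ min_frames_in_silence then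
      sp ++ List.replicate gap.length true ++ fillRuns min_frames_in_silence rest2
    else sp ++ gap ++ fillRuns min_frames_in_silence rest2
termination_by l.length
decreasing_by all_goals exact pvDropTwo_lt h

def fillGaps (min_frames_in_silence : Int) (l : List Bool) : List Bool :=
  l.takeWhile (fun b => !b) ++ fillRuns min_frames_in_silence (l.dropWhile (fun b => !b))

-- A's second loop expressed run-by-run
def segRuns (min_frames_in_speech : Int) (pos : Int) (l : List Bool) : List (Int × Int) :=
  match l with
  | [] => []
  | false :: t => segRuns min_frames_in_speech (pos + 1) t
  | true :: t =>
      let k : Nat := (t.takeWhile id).length + 1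
      let rest := t.dropWhile id
      (if rest ≠ [] ∧ (k : Int) ≥ min_frames_in_speech then [(pos, pos + (k : Int))] else [])
        ++ segRuns min_frames_in_speech (pos + (k : Int)) rest
termination_by l.length
decreasing_by
  · simp
  · exact Nat.lt_succ_of_le (List.length_dropWhile_le _ _)

-- all maximal speech runs with positions (the trailing run included)
def runsOf (pos : Int) (l : List Bool) : List (Int × Int) :=
  match l with
  | [] => []
  | false :: t => runsOf (pos + 1) t
  | true :: t =>
      let k : Nat := (t.takeWhile id).length + 1
      (pos, pos + (k : Int)) :: runsOf (pos + (k : Int)) (t.dropWhile id)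
termination_by l.length
decreasing_by
  · simp
  · exact Nat.lt_succ_of_le (List.length_dropWhile_le _ _)

-- indices of the True frames, starting at position i
def trueIdx : List Bool → Int → List Int
  | [], _ => []
  | b :: t, i => if b then i :: trueIdx t (i + 1) else trueIdx t (i + 1)

-- index-only form of bMergeStep
def bm (min_frames_in_silence : Int) (segs : List (Int × Int)) (i : Int) : List (Int × Int) :=
  match segs.getLast? with
  | some se =>
      if i - se.2 ≤ max min_frames_in_silence 0 then segs.dropLast ++ [(se.1, i + 1)]
      else segs ++ [(i, i + 1)]
  | none => segs ++ [(i, i + 1)]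

-- recursive form of the merge with an open interval [s, e)
def mergeFrom (min_frames_in_silence s e : Int) : List Int → List (Int × Int)
  | [] => [(s, e)]
  | i :: t =>
      if i - e ≤ max min_frames_in_silence 0 then mergeFrom min_frames_in_silence s (i + 1) t
      else (s, e) :: mergeFrom min_frames_in_silence i (i + 1) t

def mergeAll (min_frames_in_silence : Int) : List Int → List (Int × Int)
  | [] => []
  | i :: t => mergeFrom min_frames_in_silence i (i + 1) t

-- ---------- old bridge: port A = segRuns ∘ fillGaps ----------

-- abstract form of A's first loop
def go1 (msil : Int) : List Bool → List Bool → Option Nat → List Bool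
  | acc, [], _ => acc.reverse
  | acc, true :: t, g =>
      go1 msil (true :: (match g with
        | some k => if 1 ≤ k then List.replicate k true ++ acc.drop k else acc
        | none => acc)) t (some 0)
  | acc, false :: t, some k =>
      if ((k : Int) + 1) > msil then go1 msil (false :: acc) t none
      else go1 msil (false :: acc) t (some (k + 1))
  | acc, false :: t, none => go1 msil (false :: acc) t none

-- abstract form of A's second loop
def go2 (msp : Int) : List (Int × Int) → Int → Int → List Bool → List (Int × Int)
  | acc, _, _, [] => acc
  | acc, pos, start, x :: t =>
      if x then go2 msp acc (pos + 1) (if start < 0 then pos else start) t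
      else if start ≥ 0 then
        go2 msp (if pos - start ≥ msp then acc ++ [(start, pos)] else acc) (pos + 1) (-1) t
      else go2 msp acc (pos + 1) start t

theorem pyGetD_append_cons (xs : List Bool) (y : Bool) (ys : List Bool) :
    PySem.List.pyGetD (xs ++ y :: ys) (xs.length : Int) false = y := by
  rw [PySem.List.pyGetD_natCast]
  simp [List.getD, List.getElem?_append_right (Nat.le_refl xs.length)]

def enc1 (aLen : Nat) : Option Nat → Int
  | none => -1
  | some k => (aLen : Int) - 1 - (k : Int)

theorem bridge1 (msil : Int) : ∀ (t acc : List Bool) (g : Option Nat),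
    (∀ k, g = some k → k < acc.length) →
    ((PySem.List.pyRange (acc.length : Int) ((acc.length : Int) + (t.length : Int)) 1).foldl
        (aStep1 msil) (acc.reverse ++ t, enc1 acc.length g)).1
    = go1 msil acc t g := by
  intro t
  induction t with
  | nil =>
    intro acc g _
    rw [PySem.List.pyRange_one_eq_nil (by simp)]
    simp [go1]
  | cons x t ih =>
    intro acc g hg
    simp only [List.length_cons, Nat.cast_add, Nat.cast_one]
    rw [show (acc.length : Int) + ((t.length : Int) + 1)
        = ((acc.length : Int) + 1) + (t.length : Int) from by ring]
    rw [PySem.List.pyRange_one_cons (by omega)]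
    rw [List.foldl_cons]
    have hread : PySem.List.pyGetD (acc.reverse ++ x :: t) ((acc.length : Int)) false = x := by
      have h := pyGetD_append_cons acc.reverse x t
      simpa using h
    cases x
    · cases g with
      | none =>
        have hstep : aStep1 msil (acc.reverse ++ false :: t, enc1 acc.length none)
            ((acc.length : Int)) = ((false :: acc).reverse ++ t, enc1 (false :: acc).length none) := by
          simp [aStep1, hread, enc1]
        rw [hstep]
        have hgo : go1 msil acc (false :: t) none = go1 msil (false :: acc) t none := by
          simp [go1]
        rw [hgo]
        have H := ih (false :: acc) none (by intro k hk; cases hk)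
        rw [show (((false :: acc).length : Nat) : Int) = (acc.length : Int) + 1 from by
          simp] at H
        exact H
      | some k =>
        have hk := hg k rfl
        by_cases hc : ((k : Int) + 1) > msil
        · have hstep : aStep1 msil (acc.reverse ++ false :: t, enc1 acc.length (some k))
              ((acc.length : Int))
              = ((false :: acc).reverse ++ t, enc1 (false :: acc).length none) := by
            simp only [aStep1, hread, enc1]
            rw [if_neg (by simp)]
            rw [if_pos (show (acc.length : Int) - 1 - (k : Int) ≥ 0 by omega)]
            rw [if_pos (show (acc.length : Int) - ((acc.length : Int) - 1 - (k : Int)) > msil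
              by omega)]
            simp
          rw [hstep]
          have hgo : go1 msil acc (false :: t) (some k) = go1 msil (false :: acc) t none := by
            simp only [go1]
            rw [if_pos hc]
          rw [hgo]
          have H := ih (false :: acc) none (by intro k' hk'; cases hk')
          rw [show (((false :: acc).length : Nat) : Int) = (acc.length : Int) + 1 from by
            simp] at H
          exact H
        · have hstep : aStep1 msil (acc.reverse ++ false :: t, enc1 acc.length (some k))
              ((acc.length : Int))
              = ((false :: acc).reverse ++ t, enc1 (false :: acc).length (some (k + 1))) := by
            simp only [aStep1, hread, enc1]
            rw [if_neg (by simp)]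
            rw [if_pos (show (acc.length : Int) - 1 - (k : Int) ≥ 0 by omega)]
            rw [if_neg (show ¬((acc.length : Int) - ((acc.length : Int) - 1 - (k : Int)) > msil)
              by omega)]
            simp only [List.reverse_cons, List.append_assoc, List.singleton_append,
              List.length_cons, Prod.mk.injEq]
            constructor
            · first | trivial | rfl
            · push_cast
              ring
          rw [hstep]
          have hgo : go1 msil acc (false :: t) (some k) = go1 msil (false :: acc) t
              (some (k + 1)) := by
            simp only [go1]
            rw [if_neg hc]
          rw [hgo]
          have H := ih (false :: acc) (some (k + 1))
            (by intro k' hk'; cases hk'; simp only [List.length_cons]; omega)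
          rw [show (((false :: acc).length : Nat) : Int) = (acc.length : Int) + 1 from by
            simp] at H
          exact H
    · cases g with
      | none =>
        have hstep : aStep1 msil (acc.reverse ++ true :: t, enc1 acc.length none)
            ((acc.length : Int))
            = ((true :: acc).reverse ++ t, enc1 (true :: acc).length (some 0)) := by
          simp only [aStep1, hread, enc1]
          rw [if_pos trivial]
          rw [if_neg (show ¬((-1 : Int) ≥ 0) by omega)]
          simp only [List.reverse_cons, List.append_assoc, List.singleton_append,
            List.length_cons, Prod.mk.injEq]
          constructor
          · first | trivial | rfl
          · push_cast
            ring
        rw [hstep]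
        have hgo : go1 msil acc (true :: t) none = go1 msil (true :: acc) t (some 0) := by
          simp [go1]
        rw [hgo]
        have H := ih (true :: acc) (some 0) (by intro k hk; cases hk; simp)
        rw [show (((true :: acc).length : Nat) : Int) = (acc.length : Int) + 1 from by
          simp] at H
        exact H
      | some k =>
        have hk := hg k rfl
        by_cases h1 : 1 ≤ k
        · have htake : (acc.reverse ++ true :: t).take
              (((acc.length : Int) - 1 - (k : Int) + 1).toNat) = (acc.drop k).reverse := by
            have hn : ((acc.length : Int) - 1 - (k : Int) + 1).toNat = acc.length - k := by omega
            rw [hn]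
            rw [List.take_append_of_le_length (by simp only [List.length_reverse]; omega)]
            rw [List.take_reverse]
            have hd : acc.length - (acc.length - k) = k := by omega
            rw [hd]
          have hrepl : ((acc.length : Int) - ((acc.length : Int) - 1 - (k : Int)) - 1).toNat
              = k := by omega
          have hdropA : (acc.reverse ++ true :: t).drop (((acc.length : Int)).toNat)
              = true :: t := by
            have hn : ((acc.length : Int)).toNat = acc.reverse.length := by simp
            rw [hn, List.drop_left]
          have hstep : aStep1 msil (acc.reverse ++ true :: t, enc1 acc.length (some k))
              ((acc.length : Int))
              = ((true :: (List.replicate k true ++ acc.drop k)).reverse ++ t,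
                 enc1 (true :: (List.replicate k true ++ acc.drop k)).length (some 0)) := by
            simp only [aStep1, hread, enc1]
            rw [if_pos trivial]
            rw [if_pos (show (acc.length : Int) - 1 - (k : Int) ≥ 0 by omega)]
            rw [if_pos (show (acc.length : Int) - 1 - (k : Int) + 1 < (acc.length : Int)
              by omega)]
            rw [htake, hrepl, hdropA]
            simp only [List.reverse_cons, List.reverse_append, List.reverse_replicate,
              List.reverse_reverse, List.append_assoc, List.singleton_append,
              List.length_cons, List.length_append, List.length_replicate, List.length_drop,
              Prod.mk.injEq]
            constructor
            · first | trivial | rfl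
            · push_cast
              omega
          rw [hstep]
          have hgo : go1 msil acc (true :: t) (some k)
              = go1 msil (true :: (List.replicate k true ++ acc.drop k)) t (some 0) := by
            simp only [go1]
            rw [if_pos h1]
          rw [hgo]
          have H := ih (true :: (List.replicate k true ++ acc.drop k)) (some 0)
            (by intro k' hk'; cases hk'; simp)
          rw [show (((true :: (List.replicate k true ++ acc.drop k)).length : Nat) : Int)
              = (acc.length : Int) + 1 from by
            simp only [List.length_cons, List.length_append, List.length_replicate,
              List.length_drop]
            push_cast
            omega] at H
          exact H
        · have hstep : aStep1 msil (acc.reverse ++ true :: t, enc1 acc.length (some k))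
              ((acc.length : Int))
              = ((true :: acc).reverse ++ t, enc1 (true :: acc).length (some 0)) := by
            simp only [aStep1, hread, enc1]
            rw [if_pos trivial]
            rw [if_pos (show (acc.length : Int) - 1 - (k : Int) ≥ 0 by omega)]
            rw [if_neg (show ¬((acc.length : Int) - 1 - (k : Int) + 1 < (acc.length : Int))
              by omega)]
            simp only [List.reverse_cons, List.append_assoc, List.singleton_append,
              List.length_cons, Prod.mk.injEq]
            constructor
            · first | trivial | rfl
            · push_cast
              ring
          rw [hstep]
          have hgo : go1 msil acc (true :: t) (some k) = go1 msil (true :: acc) t (some 0) := by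
            simp only [go1]
            rw [if_neg h1]
          rw [hgo]
          have H := ih (true :: acc) (some 0) (by intro k' hk'; cases hk'; simp)
          rw [show (((true :: acc).length : Nat) : Int) = (acc.length : Int) + 1 from by
            simp] at H
          exact H

theorem bridge2 (msp : Int) : ∀ (t pre : List Bool) (acc : List (Int × Int)) (start : Int),
    ((PySem.List.pyRange (pre.length : Int) ((pre.length : Int) + (t.length : Int)) 1).foldl
        (aStep2 msp (pre ++ t)) (acc, start)).1
    = go2 msp acc (pre.length : Int) start t := by
  intro t
  induction t with
  | nil =>
    intro pre acc start
    rw [PySem.List.pyRange_one_eq_nil (by simp)]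
    simp [go2]
  | cons x t ih =>
    intro pre acc start
    simp only [List.length_cons, Nat.cast_add, Nat.cast_one]
    rw [show (pre.length : Int) + ((t.length : Int) + 1)
        = ((pre.length : Int) + 1) + (t.length : Int) from by ring]
    rw [PySem.List.pyRange_one_cons (by omega)]
    rw [List.foldl_cons]
    have hread : PySem.List.pyGetD (pre ++ x :: t) ((pre.length : Int)) false = x :=
      pyGetD_append_cons pre x t
    have hlen2 : (((pre ++ [x]).length : Nat) : Int) = (pre.length : Int) + 1 := by simp
    have hpre : pre ++ x :: t = (pre ++ [x]) ++ t := by simp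
    cases x
    · by_cases hs : start ≥ 0
      · have hstep : aStep2 msp (pre ++ false :: t) (acc, start) ((pre.length : Int))
            = (if (pre.length : Int) - start ≥ msp then acc ++ [(start, (pre.length : Int))]
               else acc, -1) := by
          simp only [aStep2, hread]
          rw [if_neg (by simp)]
          rw [if_pos hs]
        rw [hstep]
        have hgo : go2 msp acc ((pre.length : Int)) start (false :: t)
            = go2 msp (if (pre.length : Int) - start ≥ msp
                then acc ++ [(start, (pre.length : Int))] else acc)
              ((pre.length : Int) + 1) (-1) t := by
          simp only [go2, Bool.false_eq_true, if_false]
          rw [if_pos hs]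
        rw [hgo, hpre]
        have H := ih (pre ++ [false])
          (if (pre.length : Int) - start ≥ msp then acc ++ [(start, (pre.length : Int))]
           else acc) (-1)
        rw [hlen2] at H
        exact H
      · have hstep : aStep2 msp (pre ++ false :: t) (acc, start) ((pre.length : Int))
            = (acc, start) := by
          simp only [aStep2, hread]
          rw [if_neg (by simp)]
          rw [if_neg hs]
        rw [hstep]
        have hgo : go2 msp acc ((pre.length : Int)) start (false :: t)
            = go2 msp acc ((pre.length : Int) + 1) start t := by
          simp only [go2, Bool.false_eq_true, if_false]
          rw [if_neg hs]
        rw [hgo, hpre]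
        have H := ih (pre ++ [false]) acc start
        rw [hlen2] at H
        exact H
    · have hstep : aStep2 msp (pre ++ true :: t) (acc, start) ((pre.length : Int))
          = (acc, if start < 0 then ((pre.length : Int)) else start) := by
        simp only [aStep2, hread]
        rw [if_pos trivial]
      rw [hstep]
      have hgo : go2 msp acc ((pre.length : Int)) start (true :: t)
          = go2 msp acc ((pre.length : Int) + 1)
              (if start < 0 then ((pre.length : Int)) else start) t := by
        simp only [go2, if_true]
      rw [hgo, hpre]
      have H := ih (pre ++ [true]) acc (if start < 0 then ((pre.length : Int)) else start)
      rw [hlen2] at H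
      exact H

-- a gap fill in go1 only ever touches the first k ≤ acc1.length elements
theorem go1_split (msil : Int) : ∀ (t acc1 acc : List Bool) (g : Option Nat),
    (∀ k, g = some k → k ≤ acc1.length) →
    go1 msil (acc1 ++ acc) t g = acc.reverse ++ go1 msil acc1 t g := by
  intro t
  induction t with
  | nil => intro acc1 acc g _; simp [go1]
  | cons x t ih =>
    intro acc1 acc g hg
    cases x
    · cases g with
      | none =>
        simp only [go1]
        simpa using ih (false :: acc1) acc none (by simp)
      | some k =>
        by_cases hc : ((k : Int) + 1) > msil
        · simp only [go1, if_pos hc]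
          simpa using ih (false :: acc1) acc none (by simp)
        · simp only [go1, if_neg hc]
          have := ih (false :: acc1) acc (some (k + 1))
            (by intro k' h; cases h; have := hg k rfl; simp; omega)
          simpa using this
    · cases g with
      | none =>
        simp only [go1]
        simpa using ih (true :: acc1) acc (some 0) (by intro k h; cases h; simp)
      | some k =>
        have hk := hg k rfl
        by_cases h1 : 1 ≤ k
        · simp only [go1, if_pos h1]
          rw [List.drop_append_of_le_length hk]
          have := ih (true :: (List.replicate k true ++ acc1.drop k)) acc (some 0)
            (by intro k' h; cases h; simp)
          simpa [List.append_assoc] using this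
        · simp only [go1, if_neg h1]
          simpa using ih (true :: acc1) acc (some 0) (by intro k' h; cases h; simp)

theorem go1_speech (msil : Int) : ∀ (sp t acc : List Bool), (∀ x ∈ sp, x = true) →
    go1 msil acc (sp ++ t) (some 0) = go1 msil (sp.reverse ++ acc) t (some 0) := by
  intro sp
  induction sp with
  | nil => intro t acc _; simp
  | cons x sp ih =>
    intro t acc hsp
    have hx : x = true := hsp x (by simp)
    subst hx
    simp only [List.cons_append, go1]
    rw [if_neg (by omega)]
    rw [ih t (true :: acc) (fun y hy => hsp y (by simp [hy]))]
    simp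

theorem go1_none_falses (msil : Int) : ∀ (gap t acc : List Bool), (∀ x ∈ gap, x = false) →
    go1 msil acc (gap ++ t) none = go1 msil (gap.reverse ++ acc) t none := by
  intro gap
  induction gap with
  | nil => intro t acc _; simp
  | cons x gap ih =>
    intro t acc hx
    have : x = false := hx x (by simp)
    subst this
    simp only [List.cons_append, go1]
    rw [ih t (false :: acc) (fun y hy => hx y (by simp [hy]))]
    simp

theorem go1_gap (msil : Int) : ∀ (gap : List Bool) (k : Nat) (t acc : List Bool),
    (∀ x ∈ gap, x = false) → gap ≠ [] →
    go1 msil acc (gap ++ t) (some k) =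
      if ((k : Int) + (gap.length : Int) ≤ msil) then
        go1 msil (gap.reverse ++ acc) t (some (k + gap.length))
      else go1 msil (gap.reverse ++ acc) t none := by
  intro gap
  induction gap with
  | nil => intro k t acc _ hne; exact absurd rfl hne
  | cons x gap ih =>
    intro k t acc hall _
    have hx : x = false := hall x (by simp)
    subst hx
    rcases gap with _ | ⟨y, gap'⟩
    · by_cases hc : ((k : Int) + 1) > msil
      · simp only [List.cons_append, List.nil_append, go1, if_pos hc]
        simp only [List.length_cons, List.length_nil]
        rw [if_neg (by push_cast; omega)]
        simp
      · simp only [List.cons_append, List.nil_append, go1, if_neg hc]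
        simp only [List.length_cons, List.length_nil]
        rw [if_pos (by push_cast; omega)]
        simp
    · have hall' : ∀ x ∈ y :: gap', x = false := fun z hz => hall z (by simp [hz])
      by_cases hc : ((k : Int) + 1) > msil
      · simp only [List.cons_append, go1, if_pos hc]
        rw [show y :: (gap' ++ t) = (y :: gap') ++ t from rfl]
        rw [go1_none_falses msil (y :: gap') t (false :: acc) hall']
        have hlen : ¬ ((k : Int) + ((false :: y :: gap').length : Int) ≤ msil) := by
          simp only [List.length_cons]; push_cast; omega
        rw [if_neg hlen]
        simp
      · simp only [List.cons_append, go1, if_neg hc]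
        rw [show y :: (gap' ++ t) = (y :: gap') ++ t from rfl]
        rw [ih (k + 1) t (false :: acc) hall' (by simp)]
        by_cases hfit : ((k : Int) + ((false :: y :: gap').length : Int) ≤ msil)
        · rw [if_pos (by simp at hfit ⊢; push_cast at hfit ⊢; omega)]
          rw [if_pos hfit]
          have hnum : k + 1 + (y :: gap').length = k + (false :: y :: gap').length := by
            simp only [List.length_cons]; omega
          rw [hnum]
          simp [List.append_assoc]
        · rw [if_neg (by simp at hfit ⊢; push_cast at hfit ⊢; omega)]
          rw [if_neg hfit]
          simp

theorem fillRuns_cons (msil : Int) (l : List Bool) (h : l ≠ []) :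
    fillRuns msil l =
      if (l.dropWhile id).dropWhile (fun b => !b) = [] then
        l.takeWhile id ++ (l.dropWhile id).takeWhile (fun b => !b)
      else if ((((l.dropWhile id).takeWhile (fun b => !b)).length : Int) ≤ msil) then
        l.takeWhile id ++ List.replicate ((l.dropWhile id).takeWhile (fun b => !b)).length true
          ++ fillRuns msil ((l.dropWhile id).dropWhile (fun b => !b))
      else
        l.takeWhile id ++ (l.dropWhile id).takeWhile (fun b => !b)
          ++ fillRuns msil ((l.dropWhile id).dropWhile (fun b => !b)) := by
  rw [fillRuns, dif_neg h]

theorem go1_main_aux (msil : Int) : ∀ (n : Nat) (l : List Bool), l.length ≤ n →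
    (∀ x, l.head? = some x → x = true) →
    go1 msil [] l none = fillRuns msil l := by
  intro n
  induction n with
  | zero =>
    intro l hl _
    have : l = [] := List.eq_nil_of_length_eq_zero (Nat.le_zero.mp hl)
    subst this
    rw [fillRuns, dif_pos rfl]
    simp [go1]
  | succ n ih =>
    intro l hl hhead
    rcases l with _ | ⟨x, t⟩
    · rw [fillRuns, dif_pos rfl]; simp [go1]
    · have hx : x = true := hhead x rfl
      subst hx
      have hne : (true :: t) ≠ [] := by simp
      have hsp : (true :: t).takeWhile id = true :: t.takeWhile id := by
        simp [List.takeWhile_cons]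
      have hdw : (true :: t).dropWhile id = t.dropWhile id := by
        simp [List.dropWhile_cons]
      have hstep : go1 msil [] (true :: t) none = go1 msil [true] t (some 0) := by
        simp [go1]
      rw [fillRuns_cons msil _ hne, hsp, hdw, hstep]
      conv_lhs => rw [← List.takeWhile_append_dropWhile (p := id) (l := t)]
      rw [go1_speech msil _ _ _ (fun y hy => by simpa using List.mem_takeWhile_imp hy)]
      rcases hr : t.dropWhile id with _ | ⟨r, rest'⟩
      · simp [go1, List.reverse_append]
      · have hrfalse : r = false := by
          have h1 : t.dropWhile id ≠ [] := by rw [hr]; simp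
          have h2 := List.head_dropWhile_not id (l := t) h1
          simp only [hr, List.head_cons] at h2
          simpa using h2
        subst hrfalse
        have hgapall : ∀ y ∈ (false :: rest').takeWhile (fun b => !b), y = false :=
          fun y hy => by simpa using List.mem_takeWhile_imp hy
        have hgapne : (false :: rest').takeWhile (fun b => !b) ≠ [] := by
          simp [List.takeWhile_cons]
        conv_lhs => rw [← List.takeWhile_append_dropWhile (p := fun b => !b) (l := false :: rest')]
        rw [go1_gap msil _ 0 _ _ hgapall hgapne]
        have hlt : ((false :: rest').dropWhile (fun b => !b)).length ≤ n := by
          have h2 : ((false :: rest').dropWhile (fun b => !b)).length ≤ (false :: rest').length :=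
            List.length_dropWhile_le _ _
          have h3 : (t.dropWhile id).length ≤ t.length := List.length_dropWhile_le _ _
          rw [hr] at h3
          simp only [List.length_cons] at hl h2 h3 ⊢
          omega
        rcases hr2 : (false :: rest').dropWhile (fun b => !b) with _ | ⟨r2, rest2'⟩
        · rw [if_pos rfl]
          simp only [Nat.zero_add]
          split_ifs <;> simp [go1, List.reverse_append]
        · have hr2true : r2 = true := by
            have h1 : (false :: rest').dropWhile (fun b => !b) ≠ [] := by rw [hr2]; simp
            have h2 := List.head_dropWhile_not (fun b => !b) (l := false :: rest') h1
            simp only [hr2, List.head_cons] at h2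
            simpa using h2
          subst hr2true
          rw [hr2] at hlt
          rw [if_neg (show ¬(true :: rest2' = []) from by simp)]
          simp only [Nat.cast_zero, zero_add, Nat.zero_add]
          have hIH : go1 msil [] (true :: rest2') none = fillRuns msil (true :: rest2') := by
            apply ih _ hlt
            intro y hy
            simpa using hy
          have hback : go1 msil [true] rest2' (some 0) = go1 msil [] (true :: rest2') none := by
            simp [go1]
          by_cases hfit : ((((false :: rest').takeWhile (fun b => !b)).length : Int) ≤ msil)
          · rw [if_pos hfit]
            have hgl : 1 ≤ ((false :: rest').takeWhile (fun b => !b)).length := by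
              rcases hq : (false :: rest').takeWhile (fun b => !b) with _ | _
              · exact absurd hq hgapne
              · simp
            simp only [go1, if_pos hgl]
            have hdrop : (((false :: rest').takeWhile (fun b => !b)).reverse
                  ++ ((t.takeWhile id).reverse ++ [true])).drop
                  ((false :: rest').takeWhile (fun b => !b)).length
                = (t.takeWhile id).reverse ++ [true] := by
              have hlr : ((false :: rest').takeWhile (fun b => !b)).length
                  = (((false :: rest').takeWhile (fun b => !b)).reverse).length := by simp
              rw [hlr]
              exact List.drop_left
            rw [hdrop]
            have hsplit := go1_split msil rest2' [true]
              (List.replicate ((false :: rest').takeWhile (fun b => !b)).length true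
                ++ ((t.takeWhile id).reverse ++ [true])) (some 0)
              (by intro k hk; cases hk; simp)
            simp only [List.cons_append, List.nil_append] at hsplit
            rw [hsplit, hback, hIH]
            simp only [List.reverse_append, List.reverse_replicate, List.reverse_cons,
              List.reverse_reverse, List.reverse_nil, List.nil_append, List.append_assoc,
              List.cons_append, List.singleton_append]
            rw [if_pos hfit]
          · rw [if_neg hfit]
            have hsplit := go1_split msil (true :: rest2') []
              (((false :: rest').takeWhile (fun b => !b)).reverse
                ++ ((t.takeWhile id).reverse ++ [true])) none
              (by intro k hk; cases hk)
            simp only [List.nil_append] at hsplit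
            rw [hsplit, hIH]
            simp only [List.reverse_append, List.reverse_replicate, List.reverse_cons,
              List.reverse_reverse, List.reverse_nil, List.nil_append, List.append_assoc,
              List.cons_append, List.singleton_append]
            rw [if_neg hfit]

theorem go1_main (msil : Int) (l : List Bool) (h : ∀ x, l.head? = some x → x = true) :
    go1 msil [] l none = fillRuns msil l :=
  go1_main_aux msil l.length l (Nat.le_refl _) h

theorem go1_eq_fillGaps (msil : Int) (l : List Bool) :
    go1 msil [] l none = fillGaps msil l := by
  induction l with
  | nil =>
    rw [fillGaps]
    simp only [List.takeWhile_nil, List.dropWhile_nil, List.nil_append]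
    rw [fillRuns, dif_pos rfl]
    simp [go1]
  | cons x t ih =>
    cases x
    · have h1 : go1 msil [] (false :: t) none = go1 msil [false] t none := by simp [go1]
      have h2 := go1_split msil t [] [false] none (by intro k hk; cases hk)
      simp only [List.nil_append] at h2
      rw [h1, h2, ih]
      rw [fillGaps, fillGaps]
      simp [List.takeWhile_cons, List.dropWhile_cons]
    · rw [go1_main msil (true :: t) (fun y hy => by simpa using hy)]
      rw [fillGaps]
      simp [List.takeWhile_cons, List.dropWhile_cons]

theorem length_fillRuns_aux (msil : Int) : ∀ (n : Nat) (l : List Bool), l.length ≤ n →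
    (fillRuns msil l).length = l.length := by
  intro n
  induction n with
  | zero =>
    intro l hl
    have : l = [] := List.eq_nil_of_length_eq_zero (Nat.le_zero.mp hl)
    subst this
    rw [fillRuns, dif_pos rfl]
  | succ n ih =>
    intro l hl
    by_cases h : l = []
    · subst h; rw [fillRuns, dif_pos rfl]
    · rw [fillRuns_cons msil l h]
      have hdecomp : (l.takeWhile id).length + ((l.dropWhile id).takeWhile (fun b => !b)).length
          + ((l.dropWhile id).dropWhile (fun b => !b)).length = l.length := by
        conv_rhs => rw [← List.takeWhile_append_dropWhile (p := id) (l := l)]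
        conv_rhs => rw [← List.takeWhile_append_dropWhile (p := fun b => !b) (l := l.dropWhile id)]
        simp only [List.length_append]
        omega
      have hrec : ((l.dropWhile id).dropWhile (fun b => !b)).length ≤ n := by
        have := pvDropTwo_lt (l := l) h
        omega
      split_ifs with h1 h2
      · rw [h1] at hdecomp
        simp only [List.length_nil] at hdecomp
        simp only [List.length_append]
        omega
      · simp only [List.length_append, List.length_replicate, ih _ hrec]
        omega
      · simp only [List.length_append, ih _ hrec]
        omega

theorem length_fillRuns (msil : Int) (l : List Bool) :
    (fillRuns msil l).length = l.length :=
  length_fillRuns_aux msil l.length l (Nat.le_refl _)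

theorem length_fillGaps (msil : Int) (l : List Bool) :
    (fillGaps msil l).length = l.length := by
  rw [fillGaps]
  have h := congrArg List.length (List.takeWhile_append_dropWhile (p := fun b => !b) (l := l))
  simp only [List.length_append, length_fillRuns] at h ⊢
  omega

theorem go2_speech (msp : Int) : ∀ (sp t : List Bool) (acc : List (Int × Int)) (pos start : Int),
    (∀ x ∈ sp, x = true) → ¬ start < 0 →
    go2 msp acc pos start (sp ++ t) = go2 msp acc (pos + (sp.length : Int)) start t := by
  intro sp
  induction sp with
  | nil => intro t acc pos start _ _; simp
  | cons x sp ih =>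
    intro t acc pos start hall hstart
    have hx : x = true := hall x (by simp)
    subst hx
    simp only [List.cons_append, go2, if_true]
    rw [if_neg hstart]
    rw [ih t acc (pos + 1) start (fun y hy => hall y (by simp [hy])) hstart]
    congr 1
    simp only [List.length_cons]
    push_cast
    ring

theorem segRuns_cons_true (msp pos : Int) (t : List Bool) :
    segRuns msp pos (true :: t) =
      (if t.dropWhile id ≠ [] ∧ (((t.takeWhile id).length + 1 : Nat) : Int) ≥ msp then
        [(pos, pos + (((t.takeWhile id).length + 1 : Nat) : Int))] else [])
      ++ segRuns msp (pos + (((t.takeWhile id).length + 1 : Nat) : Int)) (t.dropWhile id) := by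
  rw [segRuns]

theorem go2_main_aux (msp : Int) : ∀ (n : Nat) (l : List Bool), l.length ≤ n →
    ∀ (acc : List (Int × Int)) (pos : Int),
    0 ≤ pos → go2 msp acc pos (-1) l = acc ++ segRuns msp pos l := by
  intro n
  induction n with
  | zero =>
    intro l hl acc pos _
    have : l = [] := List.eq_nil_of_length_eq_zero (Nat.le_zero.mp hl)
    subst this
    simp [go2, segRuns]
  | succ n ih =>
    intro l hl acc pos hpos
    rcases l with _ | ⟨x, t⟩
    · simp [go2, segRuns]
    · cases x
      · have hL : go2 msp acc pos (-1) (false :: t) = go2 msp acc (pos + 1) (-1) t := by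
          simp [go2]
        have hR : segRuns msp pos (false :: t) = segRuns msp (pos + 1) t := by
          rw [segRuns]
        rw [hL, hR]
        exact ih t (by simpa using Nat.le_of_succ_le_succ hl) acc (pos + 1) (by omega)
      · have hL : go2 msp acc pos (-1) (true :: t) = go2 msp acc (pos + 1) pos t := by
          simp [go2]
        rw [hL, segRuns_cons_true]
        conv_lhs => rw [← List.takeWhile_append_dropWhile (p := id) (l := t)]
        rw [go2_speech msp _ _ _ _ _ (fun y hy => by simpa using List.mem_takeWhile_imp hy)
          (by omega)]
        have hpp : pos + 1 + ((t.takeWhile id).length : Int)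
            = pos + (((t.takeWhile id).length + 1 : Nat) : Int) := by push_cast; ring
        rw [hpp]
        rcases hdw : t.dropWhile id with _ | ⟨r, rest⟩
        · simp [go2, segRuns]
        · have hrfalse : r = false := by
            have h1 : t.dropWhile id ≠ [] := by rw [hdw]; simp
            have h2 := List.head_dropWhile_not id (l := t) h1
            simp only [hdw, List.head_cons] at h2
            simpa using h2
          subst hrfalse
          have hstep : go2 msp acc (pos + (((t.takeWhile id).length + 1 : Nat) : Int)) pos
              (false :: rest)
              = go2 msp
                  (if (pos + (((t.takeWhile id).length + 1 : Nat) : Int)) - pos ≥ msp then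
                    acc ++ [(pos, pos + (((t.takeWhile id).length + 1 : Nat) : Int))] else acc)
                  (pos + (((t.takeWhile id).length + 1 : Nat) : Int) + 1) (-1) rest := by
            simp only [go2, Bool.false_eq_true, if_false]
            rw [if_pos (by omega)]
          rw [hstep]
          have hrest : rest.length ≤ n := by
            have h3 : (t.dropWhile id).length ≤ t.length := List.length_dropWhile_le _ _
            rw [hdw] at h3
            simp only [List.length_cons] at hl h3
            omega
          rw [ih rest hrest _ _ (by positivity)]
          have hcond : ((pos + (((t.takeWhile id).length + 1 : Nat) : Int)) - pos ≥ msp)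
              ↔ ((((t.takeWhile id).length + 1 : Nat) : Int) ≥ msp) := by omega
          have hR2 : segRuns msp (pos + (((t.takeWhile id).length + 1 : Nat) : Int))
              (false :: rest)
              = segRuns msp (pos + (((t.takeWhile id).length + 1 : Nat) : Int) + 1) rest := by
            rw [segRuns]
          rw [hR2]
          by_cases hy : (((t.takeWhile id).length + 1 : Nat) : Int) ≥ msp
          · rw [if_pos (hcond.mpr hy), if_pos (⟨by simp, hy⟩)]
            simp
          · rw [if_neg (fun hc => hy (hcond.mp hc)), if_neg (fun hc => hy hc.2)]
            simp

theorem go2_main (msp : Int) (l : List Bool) (acc : List (Int × Int)) (pos : Int)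
    (hpos : 0 ≤ pos) : go2 msp acc pos (-1) l = acc ++ segRuns msp pos l :=
  go2_main_aux msp l.length l (Nat.le_refl _) acc pos hpos

theorem a_eq_segRuns_fillGaps (l : List Bool) (msil msp : Int) :
    smooth_spoken_frames l msil msp = segRuns msp 0 (fillGaps msil l) := by
  unfold smooth_spoken_frames
  show ((PySem.List.pyRange 0 ((l.length : Int)) 1).foldl
      (aStep2 msp (((PySem.List.pyRange 0 ((l.length : Int)) 1).foldl (aStep1 msil) (l, -1)).1))
      ([], -1)).1 = segRuns msp 0 (fillGaps msil l)
  have h1 : ((PySem.List.pyRange 0 ((l.length : Int)) 1).foldl (aStep1 msil) (l, -1)).1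
      = fillGaps msil l := by
    have h := bridge1 msil l [] none (by intro k hk; cases hk)
    simp only [List.length_nil, Nat.cast_zero, List.reverse_nil, List.nil_append, zero_add,
      enc1] at h
    exact h.trans (go1_eq_fillGaps msil l)
  rw [h1]
  have hc : ((l.length : Nat) : Int) = (((fillGaps msil l).length : Nat) : Int) := by
    rw [length_fillGaps]
  rw [hc]
  have h2 := bridge2 msp (fillGaps msil l) [] [] (-1)
  simp only [List.length_nil, Nat.cast_zero, List.nil_append, zero_add] at h2
  rw [h2]
  rw [go2_main msp (fillGaps msil l) [] 0 le_rfl]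
  simp

-- ---------- new bridge: segRuns = filtered runsOf ----------

theorem tw_dw_len (t : List Bool) :
    (t.takeWhile id).length + (t.dropWhile id).length = t.length := by
  conv_rhs => rw [← List.takeWhile_append_dropWhile (p := id) (l := t)]
  rw [List.length_append]

theorem segRuns_eq_filter_runsOf (msp : Int) : ∀ (n : Nat) (m : List Bool), m.length ≤ n →
    ∀ (pos : Int),
    segRuns msp pos m = (runsOf pos m).filter
      (fun p => decide (p.2 < pos + (m.length : Int)) && decide (p.2 - p.1 ≥ msp)) := by
  intro n
  induction n with
  | zero =>
    intro m hm pos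
    have : m = [] := List.eq_nil_of_length_eq_zero (Nat.le_zero.mp hm)
    subst this
    simp [segRuns, runsOf]
  | succ n ih =>
    intro m hm pos
    rcases m with _ | ⟨x, t⟩
    · simp [segRuns, runsOf]
    · cases x
      · rw [show segRuns msp pos (false :: t) = segRuns msp (pos + 1) t from by rw [segRuns]]
        rw [show runsOf pos (false :: t) = runsOf (pos + 1) t from by rw [runsOf]]
        rw [ih t (by simpa using Nat.le_of_succ_le_succ hm) (pos + 1)]
        congr 1
        funext p
        congr 2
        simp only [List.length_cons]
        push_cast
        congr 1
        ring
      · have htw := tw_dw_len t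
        have hrest : (t.dropWhile id).length ≤ n := by
          have := List.length_dropWhile_le id t
          simp only [List.length_cons] at hm
          omega
        rw [segRuns_cons_true]
        rw [show runsOf pos (true :: t)
            = (pos, pos + (((t.takeWhile id).length + 1 : Nat) : Int))
              :: runsOf (pos + (((t.takeWhile id).length + 1 : Nat) : Int)) (t.dropWhile id)
          from by rw [runsOf]]
        rw [List.filter_cons]
        rw [ih (t.dropWhile id) hrest (pos + (((t.takeWhile id).length + 1 : Nat) : Int))]
        have hbound : pos + (((t.takeWhile id).length + 1 : Nat) : Int)
            + ((t.dropWhile id).length : Int) = pos + (((true :: t).length : Nat) : Int) := by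
          simp only [List.length_cons]
          push_cast
          omega
        rw [hbound]
        have hne : t.dropWhile id ≠ [] ↔ 0 < (t.dropWhile id).length := by
          constructor
          · intro h; exact List.length_pos_of_ne_nil h
          · intro h hnil; rw [hnil] at h; simp at h
        have hcondiff : (pos + (((t.takeWhile id).length + 1 : Nat) : Int)
              < pos + (((true :: t).length : Nat) : Int)) ↔ t.dropWhile id ≠ [] := by
          rw [hne]
          simp only [List.length_cons]
          push_cast
          omega
        by_cases h1 : t.dropWhile id ≠ []
        · by_cases h2 : (((t.takeWhile id).length + 1 : Nat) : Int) ≥ msp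
          · rw [if_pos ⟨h1, h2⟩]
            rw [if_pos (by
              simp only [Bool.and_eq_true, decide_eq_true_eq]
              exact ⟨hcondiff.mpr h1, by omega⟩)]
            simp
          · rw [if_neg (fun hc => h2 hc.2)]
            rw [if_neg (by
              simp only [Bool.and_eq_true, decide_eq_true_eq, not_and]
              intro _ hc
              exact h2 (by omega))]
            simp
        · rw [if_neg (fun hc => h1 hc.1)]
          rw [if_neg (by
            simp only [Bool.and_eq_true, decide_eq_true_eq, not_and]
            intro hc
            exact absurd (hcondiff.mp hc) (by simpa using h1))]
          simp

-- ---------- new bridge: runsOf ∘ fillGaps = interval merging over trueIdx ----------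

theorem trueIdx_append (a b : List Bool) : ∀ (i : Int),
    trueIdx (a ++ b) i = trueIdx a i ++ trueIdx b (i + (a.length : Int)) := by
  induction a with
  | nil => intro i; simp [trueIdx]
  | cons x a ih =>
    intro i
    cases x <;>
      simp only [List.cons_append, trueIdx, if_true, if_false, Bool.false_eq_true, ih,
        List.length_cons, List.cons_append] <;>
      [skip; skip] <;>
      · congr 2
        push_cast
        ring

theorem trueIdx_falses (gap : List Bool) (hall : ∀ x ∈ gap, x = false) : ∀ (i : Int),
    trueIdx gap i = [] := by
  induction gap with
  | nil => intro i; rfl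
  | cons x t ih =>
    intro i
    have hx : x = false := hall x (by simp)
    subst hx
    simp only [trueIdx, Bool.false_eq_true, if_false]
    exact ih (fun y hy => hall y (by simp [hy])) (i + 1)

theorem mergeFrom_trues (msil : Int) : ∀ (sp : List Bool), (∀ x ∈ sp, x = true) →
    ∀ (s e : Int) (t : List Int),
    mergeFrom msil s e (trueIdx sp e ++ t) = mergeFrom msil s (e + (sp.length : Int)) t := by
  intro sp
  induction sp with
  | nil => intro _ s e t; simp [trueIdx]
  | cons x sp ih =>
    intro hall s e t
    have hx : x = true := hall x (by simp)
    subst hx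
    simp only [trueIdx, if_true, List.cons_append, mergeFrom]
    rw [if_pos (by omega)]
    rw [ih (fun y hy => hall y (by simp [hy])) s (e + 1) t]
    congr 1
    simp only [List.length_cons]
    push_cast
    ring

theorem mergeFrom_shift (msil : Int) : ∀ (t : List Int) (e s s' : Int),
    ∃ e' rs, mergeFrom msil s e t = (s, e') :: rs ∧ mergeFrom msil s' e t = (s', e') :: rs := by
  intro t
  induction t with
  | nil => intro e s s'; exact ⟨e, [], rfl, rfl⟩
  | cons i t ih =>
    intro e s s'
    by_cases hc : i - e ≤ max msil 0
    · obtain ⟨e', rs, h1, h2⟩ := ih (i + 1) s s'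
      exact ⟨e', rs, by rw [mergeFrom, if_pos hc]; exact h1,
        by rw [mergeFrom, if_pos hc]; exact h2⟩
    · exact ⟨e, mergeFrom msil i (i + 1) t, by rw [mergeFrom, if_neg hc],
        by rw [mergeFrom, if_neg hc]⟩

theorem takeWhile_append_of_head (sp m : List Bool) (hall : ∀ x ∈ sp, x = true)
    (hm : m = [] ∨ m.head? = some false) :
    (sp ++ m).takeWhile id = sp ∧ (sp ++ m).dropWhile id = m := by
  induction sp with
  | nil =>
    rcases hm with h | h
    · subst h; simp
    · rcases m with _ | ⟨y, t⟩
      · simp at h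
      · simp only [List.head?_cons, Option.some.injEq] at h
        subst h
        simp [List.takeWhile, List.dropWhile]
  | cons x sp ih =>
    have hx : x = true := hall x (by simp)
    subst hx
    obtain ⟨h1, h2⟩ := ih (fun y hy => hall y (by simp [hy]))
    constructor
    · simp [List.takeWhile_cons, h1]
    · simp [List.dropWhile_cons, h2]

theorem runsOf_true_head (pos : Int) (l : List Bool) (h : l.head? = some true) :
    runsOf pos l = (pos, pos + ((l.takeWhile id).length : Int))
      :: runsOf (pos + ((l.takeWhile id).length : Int)) (l.dropWhile id) := by
  rcases l with _ | ⟨x, t⟩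
  · simp at h
  · simp only [List.head?_cons, Option.some.injEq] at h
    subst h
    rw [runsOf]
    simp only [List.takeWhile_cons, id_eq, if_true, List.dropWhile_cons, List.length_cons]

theorem runsOf_falses : ∀ (gap : List Bool), (∀ x ∈ gap, x = false) →
    ∀ (pos : Int) (m : List Bool), runsOf pos (gap ++ m) = runsOf (pos + (gap.length : Int)) m := by
  intro gap
  induction gap with
  | nil => intro _ pos m; simp
  | cons x t ih =>
    intro hall pos m
    have hx : x = false := hall x (by simp)
    subst hx
    rw [show (false :: t) ++ m = false :: (t ++ m) from rfl]
    rw [show runsOf pos (false :: (t ++ m)) = runsOf (pos + 1) (t ++ m) from by rw [runsOf]]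
    rw [ih (fun y hy => hall y (by simp [hy])) (pos + 1) m]
    congr 1
    simp only [List.length_cons]
    push_cast
    ring

theorem runsOf_falses_nil (gap : List Bool) (hall : ∀ x ∈ gap, x = false) (pos : Int) :
    runsOf pos gap = [] := by
  have h := runsOf_falses gap hall pos []
  rw [List.append_nil] at h
  rw [h]
  rw [runsOf]

theorem fillRuns_head_true (msil : Int) (l : List Bool) (h : l.head? = some true) :
    (fillRuns msil l).head? = some true := by
  rcases l with _ | ⟨x, t⟩
  · simp at h
  · simp only [List.head?_cons, Option.some.injEq] at h
    subst h
    rw [fillRuns_cons msil _ (by simp)]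
    have hsp : (true :: t).takeWhile id = true :: t.takeWhile id := by
      simp [List.takeWhile_cons]
    split_ifs <;> rw [hsp] <;> simp

theorem runsOf_fillRuns_eq_mergeAll (msil : Int) : ∀ (n : Nat) (l : List Bool), l.length ≤ n →
    (∀ x, l.head? = some x → x = true) → ∀ (pos : Int),
    runsOf pos (fillRuns msil l) = mergeAll msil (trueIdx l pos) := by
  intro n
  induction n with
  | zero =>
    intro l hl _ pos
    have : l = [] := List.eq_nil_of_length_eq_zero (Nat.le_zero.mp hl)
    subst this
    rw [fillRuns, dif_pos rfl]
    simp [runsOf, trueIdx, mergeAll]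
  | succ n ih =>
    intro l hl hhead pos
    rcases l with _ | ⟨x, t⟩
    · rw [fillRuns, dif_pos rfl]; simp [runsOf, trueIdx, mergeAll]
    · have hx : x = true := hhead x rfl
      subst hx
      -- decompose l = sp ++ (gap ++ rest2) with opaque names
      obtain ⟨sp, hsp_def⟩ : ∃ y, (true :: t).takeWhile id = y := ⟨_, rfl⟩
      obtain ⟨gap, hgap_def⟩ : ∃ y, ((true :: t).dropWhile id).takeWhile (fun b => !b) = y :=
        ⟨_, rfl⟩
      obtain ⟨rest2, hrest2_def⟩ : ∃ y, ((true :: t).dropWhile id).dropWhile (fun b => !b) = y :=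
        ⟨_, rfl⟩
      have hsp : sp = true :: t.takeWhile id := by
        rw [← hsp_def]; simp [List.takeWhile_cons]
      have hspall : ∀ x ∈ sp, x = true := by
        intro y hy; rw [← hsp_def] at hy; simpa using List.mem_takeWhile_imp hy
      have hgapall : ∀ x ∈ gap, x = false := by
        intro y hy; rw [← hgap_def] at hy; simpa using List.mem_takeWhile_imp hy
      have hrestdec : (true :: t) = sp ++ (gap ++ rest2) := by
        rw [← hsp_def, ← hgap_def, ← hrest2_def,
          List.takeWhile_append_dropWhile, List.takeWhile_append_dropWhile]
      obtain ⟨sp', hspc, hsp'all⟩ : ∃ sp', sp = true :: sp' ∧ (∀ x ∈ sp', x = true) :=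
        ⟨t.takeWhile id, hsp, fun y hy => by simpa using List.mem_takeWhile_imp hy⟩
      have hspa : 1 ≤ sp.length := by rw [hspc]; simp
      have htidx : trueIdx (true :: t) pos
          = trueIdx sp pos ++ trueIdx rest2 (pos + (sp.length : Int) + (gap.length : Int)) := by
        conv_lhs => rw [hrestdec]
        rw [trueIdx_append, trueIdx_append, trueIdx_falses gap hgapall, List.nil_append]
      have htsp : trueIdx sp pos = pos :: trueIdx sp' (pos + 1) := by
        rw [hspc]; simp [trueIdx]
      have hmerge1 : mergeAll msil (trueIdx (true :: t) pos)
          = mergeFrom msil pos (pos + (sp.length : Int))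
              (trueIdx rest2 (pos + (sp.length : Int) + (gap.length : Int))) := by
        rw [htidx, htsp]
        simp only [List.cons_append, mergeAll]
        rw [mergeFrom_trues msil sp' hsp'all pos (pos + 1)
          (trueIdx rest2 (pos + (sp.length : Int) + (gap.length : Int)))]
        congr 1
        rw [hspc]
        simp only [List.length_cons]
        push_cast
        ring
      have hrest2head : rest2 = [] ∨ rest2.head? = some true := by
        rcases hr2 : rest2 with _ | ⟨r2, t2⟩
        · exact Or.inl rfl
        · right
          have h1 : ((true :: t).dropWhile id).dropWhile (fun b => !b) ≠ [] := by
            rw [hrest2_def, hr2]; simp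
          have h2 := List.head_dropWhile_not (fun b => !b) (l := (true :: t).dropWhile id) h1
          simp only [hrest2_def, hr2, List.head_cons] at h2
          simp only [List.head?_cons, Option.some.injEq]
          simpa using h2
      rw [hmerge1]
      rw [fillRuns_cons msil _ (by simp)]
      rw [hsp_def, hgap_def, hrest2_def]
      by_cases hre : rest2 = []
      · rw [if_pos hre]
        have hgap_head : gap = [] ∨ gap.head? = some false := by
          rcases hg : gap with _ | ⟨g0, gt⟩
          · exact Or.inl rfl
          · right
            have : g0 = false := hgapall g0 (by rw [hg]; simp)
            simp [this]
        obtain ⟨htw, hdw2⟩ := takeWhile_append_of_head sp gap hspall hgap_head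
        have hhd : (sp ++ gap).head? = some true := by
          rw [hspc]; simp
        rw [runsOf_true_head pos _ hhd, htw, hdw2]
        rw [runsOf_falses_nil gap hgapall]
        rw [hre]
        simp [trueIdx, mergeFrom]
      · have hr2h : rest2.head? = some true := by
          rcases hrest2head with h | h
          · exact absurd h hre
          · exact h
        have hgapne : gap ≠ [] := by
          intro hg
          have h1 : (true :: t).dropWhile id ≠ [] := by
            intro hd
            apply hre
            rw [← hrest2_def, hd]
            rfl
          have h2 := List.head_dropWhile_not id (l := (true :: t)) h1
          rcases hdd : (true :: t).dropWhile id with _ | ⟨d0, dt⟩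
          · exact h1 hdd
          · simp only [hdd, List.head_cons] at h2
            have hd0 : d0 = false := by simpa using h2
            subst hd0
            rw [← hgap_def, hdd] at hg
            simp [List.takeWhile_cons] at hg
        have hgl : 1 ≤ gap.length := by
          rcases gap with _ | _
          · exact absurd rfl hgapne
          · simp
        have hrlen : rest2.length ≤ n := by
          have h1 := pvDropTwo_lt (l := (true :: t)) (by simp)
          rw [hrest2_def] at h1
          simp only [List.length_cons] at hl h1
          omega
        have hIH := ih rest2 hrlen (fun y hy => by
          rw [hr2h] at hy
          simpa using hy.symm)
        obtain ⟨t2, ht2⟩ : ∃ t2, rest2 = true :: t2 := by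
          rcases hr : rest2 with _ | ⟨r2, t2⟩
          · exact absurd hr hre
          · rw [hr] at hr2h
            simp only [List.head?_cons, Option.some.injEq] at hr2h
            subst hr2h
            exact ⟨t2, rfl⟩
        have htr2 : trueIdx rest2 (pos + (sp.length : Int) + (gap.length : Int))
            = (pos + (sp.length : Int) + (gap.length : Int))
              :: trueIdx t2 (pos + (sp.length : Int) + (gap.length : Int) + 1) := by
          rw [ht2]; simp [trueIdx]
        by_cases hfit : ((gap.length : Int) ≤ msil)
        · rw [if_neg hre, if_pos hfit]
          have hfrh : (fillRuns msil rest2).head? = some true :=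
            fillRuns_head_true msil rest2 (by rw [ht2]; simp)
          obtain ⟨f2, hf2⟩ : ∃ f2, fillRuns msil rest2 = true :: f2 := by
            rcases hf : fillRuns msil rest2 with _ | ⟨x0, t0⟩
            · rw [hf] at hfrh; simp at hfrh
            · rw [hf] at hfrh
              simp only [List.head?_cons, Option.some.injEq] at hfrh
              subst hfrh
              exact ⟨t0, rfl⟩
          have hbig : sp ++ List.replicate gap.length true ++ fillRuns msil rest2
              = (sp ++ List.replicate gap.length true ++ (fillRuns msil rest2).takeWhile id)
                ++ (fillRuns msil rest2).dropWhile id := by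
            simp only [List.append_assoc]
            rw [List.takeWhile_append_dropWhile]
          have hallbig : ∀ x ∈ sp ++ List.replicate gap.length true
              ++ (fillRuns msil rest2).takeWhile id, x = true := by
            intro y hy
            simp only [List.mem_append] at hy
            rcases hy with (hy | hy) | hy
            · exact hspall y hy
            · exact List.eq_of_mem_replicate hy
            · simpa using List.mem_takeWhile_imp hy
          have hdwshape : (fillRuns msil rest2).dropWhile id = [] ∨
              ((fillRuns msil rest2).dropWhile id).head? = some false := by
            rcases hdd : (fillRuns msil rest2).dropWhile id with _ | ⟨d0, dt⟩
            · exact Or.inl rfl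
            · right
              have h1 : (fillRuns msil rest2).dropWhile id ≠ [] := by rw [hdd]; simp
              have h2 := List.head_dropWhile_not id (l := fillRuns msil rest2) h1
              simp only [hdd, List.head_cons] at h2
              simp only [List.head?_cons, Option.some.injEq]
              simpa using h2
          obtain ⟨htwb, hdwb⟩ := takeWhile_append_of_head
            (sp ++ List.replicate gap.length true ++ (fillRuns msil rest2).takeWhile id)
            ((fillRuns msil rest2).dropWhile id) hallbig hdwshape
          have hheadb : (sp ++ List.replicate gap.length true ++ fillRuns msil rest2).head?
              = some true := by
            rw [hspc]; simp
          rw [runsOf_true_head pos _ hheadb]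
          conv_lhs => rw [hbig]
          rw [htwb, hdwb]
          rw [htr2, mergeFrom]
          rw [if_pos (by omega)]
          have hIHq := hIH (pos + (sp.length : Int) + (gap.length : Int))
          rw [htr2] at hIHq
          simp only [mergeAll] at hIHq
          have hrunfr := runsOf_true_head (pos + (sp.length : Int) + (gap.length : Int))
            (fillRuns msil rest2) hfrh
          rw [hrunfr] at hIHq
          obtain ⟨e', rs, hm1, hm2⟩ := mergeFrom_shift msil
            (trueIdx t2 (pos + (sp.length : Int) + (gap.length : Int) + 1))
            (pos + (sp.length : Int) + (gap.length : Int) + 1) pos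
            (pos + (sp.length : Int) + (gap.length : Int))
          rw [hm2] at hIHq
          rw [hm1]
          simp only [List.cons.injEq, Prod.mk.injEq] at hIHq
          obtain ⟨⟨-, he'⟩, hrs⟩ := hIHq
          have hlenb : pos + (((sp ++ List.replicate gap.length true
              ++ (fillRuns msil rest2).takeWhile id).length : Nat) : Int)
              = pos + (sp.length : Int) + (gap.length : Int)
                + (((fillRuns msil rest2).takeWhile id).length : Int) := by
            simp only [List.length_append, List.length_replicate]
            push_cast
            ring
          rw [show (pos + (((sp ++ List.replicate gap.length true
              ++ (fillRuns msil rest2).takeWhile id).length : Nat) : Int)) = pos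
              + (sp.length : Int) + (gap.length : Int)
              + (((fillRuns msil rest2).takeWhile id).length : Int) from hlenb]
          rw [hrs, he']
        · rw [if_neg hre, if_neg hfit]
          have hgap_head : gap.head? = some false := by
            rcases hg : gap with _ | ⟨g0, gt⟩
            · exact absurd hg hgapne
            · have : g0 = false := hgapall g0 (by rw [hg]; simp)
              simp [this]
          obtain ⟨htw, hdw2⟩ := takeWhile_append_of_head sp (gap ++ fillRuns msil rest2)
            hspall
            (by right
                rcases hg : gap with _ | ⟨g0, gt⟩
                · exact absurd hg hgapne
                · rw [hg] at hgap_head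
                  simpa using hgap_head)
          have hheadb : (sp ++ (gap ++ fillRuns msil rest2)).head? = some true := by
            rw [hspc]; simp
          rw [show sp ++ gap ++ fillRuns msil rest2 = sp ++ (gap ++ fillRuns msil rest2) from by
            simp [List.append_assoc]]
          rw [runsOf_true_head pos _ hheadb, htw, hdw2]
          rw [runsOf_falses gap hgapall]
          rw [hIH, htr2]
          simp only [mergeAll]
          rw [mergeFrom]
          rw [if_neg (by omega)]

-- merged runs of the filled array = interval merging over the original True indices
theorem runsOf_fillGaps_eq_mergeAll (msil : Int) (l : List Bool) :
    runsOf 0 (fillGaps msil l) = mergeAll msil (trueIdx l 0) := by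
  rw [fillGaps]
  have hleadall : ∀ x ∈ l.takeWhile (fun b => !b), x = false :=
    fun y hy => by simpa using List.mem_takeWhile_imp hy
  rw [runsOf_falses _ hleadall]
  have hresthead : ∀ x, (l.dropWhile (fun b => !b)).head? = some x → x = true := by
    intro y hy
    rcases hdd : l.dropWhile (fun b => !b) with _ | ⟨d0, dt⟩
    · rw [hdd] at hy; simp at hy
    · have h1 : l.dropWhile (fun b => !b) ≠ [] := by rw [hdd]; simp
      have h2 := List.head_dropWhile_not (fun b => !b) (l := l) h1
      simp only [hdd, List.head_cons] at h2
      rw [hdd] at hy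
      simp only [List.head?_cons, Option.some.injEq] at hy
      subst hy
      simpa using h2
  rw [runsOf_fillRuns_eq_mergeAll msil (l.dropWhile (fun b => !b)).length _ (Nat.le_refl _)
    hresthead]
  congr 1
  conv_rhs => rw [← List.takeWhile_append_dropWhile (p := fun b => !b) (l := l)]
  rw [trueIdx_append, trueIdx_falses _ hleadall, List.nil_append]

-- ---------- new bridge: B's foldl = mergeAll ----------

theorem foldl_bm_concat (msil : Int) : ∀ (t : List Int) (segs : List (Int × Int)) (s e : Int),
    t.foldl (bm msil) (segs ++ [(s, e)]) = segs ++ mergeFrom msil s e t := by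
  intro t
  induction t with
  | nil => intro segs s e; simp [mergeFrom]
  | cons i t ih =>
    intro segs s e
    rw [List.foldl_cons]
    rw [show bm msil (segs ++ [(s, e)]) i
        = if i - e ≤ max msil 0 then segs ++ [(s, i + 1)]
          else (segs ++ [(s, e)]) ++ [(i, i + 1)] from by
      rw [bm, List.getLast?_concat]
      dsimp only
      rw [List.dropLast_concat]]
    by_cases hc : i - e ≤ max msil 0
    · rw [if_pos hc, ih segs s (i + 1)]
      rw [show mergeFrom msil s e (i :: t) = mergeFrom msil s (i + 1) t from by
        rw [mergeFrom, if_pos hc]]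
    · rw [if_neg hc, ih (segs ++ [(s, e)]) i (i + 1)]
      rw [show mergeFrom msil s e (i :: t) = (s, e) :: mergeFrom msil i (i + 1) t from by
        rw [mergeFrom, if_neg hc]]
      simp

theorem foldl_bm_eq_mergeAll (msil : Int) (t : List Int) :
    t.foldl (bm msil) [] = mergeAll msil t := by
  rcases t with _ | ⟨i, t⟩
  · rfl
  · rw [List.foldl_cons]
    rw [show bm msil [] i = [] ++ [(i, i + 1)] from by rw [bm]; rfl]
    rw [foldl_bm_concat msil t [] i (i + 1)]
    simp [mergeAll]

theorem foldl_enumerate_eq_foldl_trueIdx (msil : Int) : ∀ (l : List Bool) (s : Int)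
    (segs : List (Int × Int)),
    (PySem.List.enumerate l s).foldl (bMergeStep msil) segs
      = (trueIdx l s).foldl (bm msil) segs := by
  intro l
  induction l with
  | nil => intro s segs; simp [PySem.List.enumerate_nil, trueIdx]
  | cons x t ih =>
    intro s segs
    rw [PySem.List.enumerate_cons, List.foldl_cons]
    cases x
    · rw [show bMergeStep msil segs (s, false) = segs from by rw [bMergeStep]; rfl]
      rw [show trueIdx (false :: t) s = trueIdx t (s + 1) from by simp [trueIdx]]
      exact ih (s + 1) segs
    · rw [show bMergeStep msil segs (s, true) = bm msil segs s from by
        rw [bMergeStep, bm]; rfl]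
      rw [show trueIdx (true :: t) s = s :: trueIdx t (s + 1) from by simp [trueIdx]]
      rw [List.foldl_cons]
      exact ih (s + 1) (bm msil segs s)

-- ===== VERDICT (by name: the statement is the Claim_ definition above) =====
theorem smooth_spoken_frames_spec : Claim_equal_smooth_spoken_frames := by
  intro l msil msp _
  unfold Spec_smooth_spoken_frames
  rw [a_eq_segRuns_fillGaps]
  unfold smooth_spoken_frames_alt
  rw [foldl_enumerate_eq_foldl_trueIdx, foldl_bm_eq_mergeAll,
    ← runsOf_fillGaps_eq_mergeAll]
  rw [segRuns_eq_filter_runsOf msp (fillGaps msil l).length _ (Nat.le_refl _) 0]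
  congr 1
  funext p
  rw [length_fillGaps]
  norm_num
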